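-- pv_equiv track=rewrite | github.com/Zagato27/ATK | src/agent_test_kit/generic_tests/scope_recovery.py | _looks_like_environment_error
-- ===== SOURCE A (Python) =====
-- def _looks_like_environment_error(message: str) -> bool:
--     lower = message.lower()
--     return any(
--         token in lower
--         for token in (
--             "502",
--             "503",
--             "504",
--             "bad gateway",
--             "proxyerror",
--             "httpconnectionpool",
--             "max retries exceeded",
--             "connection reset",
--             "connection refused",
--             "timed out",
--             "service unavailable",
--             "gateway timeout",
--         )
--     )
-- ===== SOURCE B (Python) =====
-- _TOKENS = (
--     "502",
--     "503",
--     "504",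
--     "bad gateway",
--     "proxyerror",
--     "httpconnectionpool",
--     "max retries exceeded",
--     "connection reset",
--     "connection refused",
--     "timed out",
--     "service unavailable",
--     "gateway timeout",
-- )
--
--
-- def _looks_like_environment_error(message: str) -> bool:
--     # Single left-to-right pass: at each position, test whether any token starts there.
--     lower = message.lower()
--     for i in range(len(lower)):
--         for token in _TOKENS:
--             if lower.startswith(token, i):
--                 return True
--     return False
-- ===== Notes on version B (the rewrite author's own statement) =====
-- stated objective: alternative
-- what changed: Replaces the token-outer loop of k independent substring scans ('token in lower' for each token) with a single position-outer left-to-right pass that tests at each index whether any token starts there.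
import Mathlib
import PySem

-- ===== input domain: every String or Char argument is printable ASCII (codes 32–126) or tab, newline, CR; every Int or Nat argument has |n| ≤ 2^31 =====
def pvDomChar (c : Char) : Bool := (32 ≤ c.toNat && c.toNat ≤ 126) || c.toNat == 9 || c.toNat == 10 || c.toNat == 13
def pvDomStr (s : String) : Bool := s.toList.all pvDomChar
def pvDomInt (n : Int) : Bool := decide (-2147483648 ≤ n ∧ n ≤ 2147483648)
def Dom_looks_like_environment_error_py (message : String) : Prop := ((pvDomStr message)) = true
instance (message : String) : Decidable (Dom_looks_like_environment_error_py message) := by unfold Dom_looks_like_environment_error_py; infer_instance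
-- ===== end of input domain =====

-- B replaces k independent substring scans with one left-to-right pass testing every token at each position (alternative decomposition, same cost).


-- the token tuple of A (and the _TOKENS constant of B)
def pvTokens : List String :=
  ["502", "503", "504", "bad gateway", "proxyerror", "httpconnectionpool",
   "max retries exceeded", "connection reset", "connection refused",
   "timed out", "service unavailable", "gateway timeout"]

-- ===== PORT A =====
def looks_like_environment_error_py (message : String) : Bool :=
  let lower := PySem.Str.lower message
  pvTokens.any (fun token => PySem.Str.isIn token lower)

-- ===== PORT B =====
-- Source B's position loop 'for i in range(len(lower))', as recursion on the suffix at i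
def pvScanB : List Char → Bool
  | [] => false
  | c :: rest =>
      if pvTokens.any (fun token => PySem.Chars.startswith (c :: rest) token.toList) then true
      else pvScanB rest

def looks_like_environment_error_py_alt (message : String) : Bool :=
  let lower := PySem.Str.lower message
  pvScanB lower.toList

-- ===== PRECONDITION & SPEC =====
def Spec_looks_like_environment_error_py (message : String) (out : Bool) : Prop := out = looks_like_environment_error_py_alt message
instance (message : String) (out : Bool) : Decidable (Spec_looks_like_environment_error_py message out) := by unfold Spec_looks_like_environment_error_py; infer_instance

-- ===== CLAIM (what is proved, stated in full; the proofs are below) =====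
def Claim_equal_looks_like_environment_error_py : Prop := ∀ (message : String), Dom_looks_like_environment_error_py message → Spec_looks_like_environment_error_py message (looks_like_environment_error_py message)

-- ===== LEMMAS AND PROOFS =====

-- B's scan finds a token iff some token is an infix of the text
theorem pvScanB_iff (s : List Char) :
    pvScanB s = true ↔ ∃ t ∈ pvTokens, t.toList <:+: s := by
  induction s with
  | nil => decide
  | cons c rest ih =>
      simp only [pvScanB]
      split_ifs with h
      · simp only [List.any_eq_true, PySem.Chars.startswith_iff] at h
        obtain ⟨t, ht, hpre⟩ := h
        exact iff_of_true rfl ⟨t, ht, hpre.isInfix⟩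
      · simp only [List.any_eq_true, PySem.Chars.startswith_iff, not_exists, not_and] at h
        rw [ih]
        constructor
        · rintro ⟨t, ht, hinf⟩
          exact ⟨t, ht, (List.infix_cons_iff.mpr (Or.inr hinf))⟩
        · rintro ⟨t, ht, hinf⟩
          rcases List.infix_cons_iff.mp hinf with hp | hi
          · exact absurd hp (h t ht)
          · exact ⟨t, ht, hi⟩

-- ===== VERDICT (by name: the statement is the Claim_ definition above) =====
theorem looks_like_environment_error_py_spec : Claim_equal_looks_like_environment_error_py := by
  intro message _
  unfold Spec_looks_like_environment_error_py looks_like_environment_error_py looks_like_environment_error_py_alt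
  rw [Bool.eq_iff_iff, pvScanB_iff]
  simp only [List.any_eq_true]
  constructor
  · rintro ⟨t, ht, hin⟩
    exact ⟨t, ht, (PySem.Str.isIn_iff_infix t _).mp hin⟩
  · rintro ⟨t, ht, hinf⟩
    exact ⟨t, ht, (PySem.Str.isIn_iff_infix t _).mpr hinf⟩
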